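-- pv_equiv track=rewrite | github.com/KoenduBuf/CodingPuzzles | shared_py/grid.py | reconstruct_all_paths
-- ===== SOURCE A (Python) =====
-- def reconstruct_all_paths(back_map, final_state):
--     paths_back_stack = [ [ final_state ] ]
--     while len(paths_back_stack) > 0:
--         path_back = paths_back_stack.pop()
--         if path_back[-1] not in back_map:
--             yield path_back[::-1]
--             continue
--         _, ways = back_map[path_back[-1]]
--         for way in reversed(ways):
--             paths_back_stack.append(path_back + [ way ])
-- ===== SOURCE B (Python) =====
-- def reconstruct_all_paths(back_map, final_state):
--     # Recursive DFS generator: ways are iterated in original order, which is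
--     # exactly the order A's explicit stack (pushing reversed(ways)) produces.
--     def dfs(path_back):
--         if path_back[-1] not in back_map:
--             yield path_back[::-1]
--             return
--         _, ways = back_map[path_back[-1]]
--         for way in ways:
--             yield from dfs(path_back + [way])
--     yield from dfs([final_state])
-- ===== Notes on version B (the rewrite author's own statement) =====
-- stated objective: simpler
-- what changed: The explicit worklist (a stack of partial paths popped in a while loop, with ways pushed reversed to counteract LIFO) is replaced by a short recursive generator that yields from each way in original order.
import Mathlib
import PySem

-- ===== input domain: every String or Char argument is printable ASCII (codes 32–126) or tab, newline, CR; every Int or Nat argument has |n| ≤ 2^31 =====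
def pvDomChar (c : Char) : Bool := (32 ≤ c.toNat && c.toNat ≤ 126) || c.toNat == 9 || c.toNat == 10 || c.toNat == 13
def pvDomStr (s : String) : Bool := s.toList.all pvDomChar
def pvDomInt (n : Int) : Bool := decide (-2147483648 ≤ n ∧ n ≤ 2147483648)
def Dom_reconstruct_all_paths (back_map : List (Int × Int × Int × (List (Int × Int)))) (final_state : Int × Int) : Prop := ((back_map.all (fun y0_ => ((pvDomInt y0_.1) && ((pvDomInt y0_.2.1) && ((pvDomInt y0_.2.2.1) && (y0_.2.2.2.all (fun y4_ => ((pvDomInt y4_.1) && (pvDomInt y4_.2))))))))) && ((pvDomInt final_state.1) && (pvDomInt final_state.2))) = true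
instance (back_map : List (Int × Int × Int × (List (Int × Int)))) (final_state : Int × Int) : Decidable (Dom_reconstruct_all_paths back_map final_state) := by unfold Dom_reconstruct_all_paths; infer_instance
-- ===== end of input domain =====

-- B replaces A's explicit stack-of-partial-paths loop by a short recursive DFS generator
-- (ways iterated in original order); same output list, objective: simpler.
-- A and B are Python GENERATORS; the ports compute the list of yielded values, in order.

-- ===== PORT A =====

-- dict membership test 's in back_map' and lookup 'back_map[s]' in one step:
-- first entry whose key equals s (exact for the Python dict, whose keys are unique).
def bmGet? (back_map : List (Int × Int × Int × (List (Int × Int)))) (s : Int × Int) :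
    Option (Int × List (Int × Int)) :=
  match back_map with
  | [] => none
  | y :: rest => if y.1 = s.1 ∧ y.2.1 = s.2 then some (y.2.2.1, y.2.2.2) else bmGet? rest s

-- fuel bound for A's while loop (a termination guard only; under Pre_ it is never exhausted):
-- total number of back-pointers in the map …
def waysTotal : List (Int × Int × Int × (List (Int × Int))) → Nat
  | [] => 0
  | y :: rest => y.2.2.2.length + waysTotal rest

-- … and the weight function fuelF L r = 1 + L + L² + … + Lʳ.
def fuelF (L : Nat) : Nat → Nat
  | 0 => 1
  | r + 1 => 1 + L * fuelF L r

-- A's while loop: pop the LAST path (Python list.pop()), yield it reversed if its last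
-- state is not a key, else push path+[way] for way in reversed(ways).
-- A path on the stack is never empty, so the default of pyGetD (path_back[-1]) is never used.
def loopA (back_map : List (Int × Int × Int × (List (Int × Int)))) (fuel : Nat)
    (stack acc : List (List (Int × Int))) : List (List (Int × Int)) :=
  match fuel with
  | 0 => acc
  | fuel + 1 =>
    match stack.getLast? with
    | none => acc
    | some path_back =>
      let rest := stack.dropLast
      match bmGet? back_map (PySem.List.pyGetD path_back (-1) (0, 0)) with
      | none => loopA back_map fuel rest (acc ++ [path_back.reverse])
      | some x => loopA back_map fuel (rest ++ x.2.reverse.map (fun way => path_back ++ [way])) acc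

def reconstruct_all_paths (back_map : List (Int × Int × Int × (List (Int × Int)))) (final_state : Int × Int) : List (List (Int × Int)) :=
  loopA back_map (fuelF (waysTotal back_map) back_map.length) [[final_state]] []

-- ===== PORT B =====

-- B's inner recursive generator dfs(path_back); fuel is a depth guard only
-- (under Pre_ the recursion depth is at most back_map.length + 1).
def dfsB (back_map : List (Int × Int × Int × (List (Int × Int)))) (fuel : Nat)
    (path_back : List (Int × Int)) : List (List (Int × Int)) :=
  match fuel with
  | 0 => []
  | fuel + 1 =>
    match bmGet? back_map (PySem.List.pyGetD path_back (-1) (0, 0)) with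
    | none => [path_back.reverse]
    | some x => x.2.flatMap (fun way => dfsB back_map fuel (path_back ++ [way]))

def reconstruct_all_paths_alt (back_map : List (Int × Int × Int × (List (Int × Int)))) (final_state : Int × Int) : List (List (Int × Int)) :=
  dfsB back_map (back_map.length + 1) [final_state]

-- ===== PRECONDITION & SPEC =====

-- the ways listed for a state in back_map (none if the state is not a key):
-- a plain first-match association lookup via the library's List.find?.
def keyWays (bm : List (Int × Int × Int × (List (Int × Int)))) (s : Int × Int) :
    Option (List (Int × Int)) :=
  (bm.find? (fun y => y.1 == s.1 && y.2.1 == s.2)).map (fun y => y.2.2.2)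

-- okB bm n s = true iff every backward chain starting at s dies out (reaches a non-key)
-- within n steps.  Since a chain that never repeats a key has at most bm.length steps,
-- okB bm bm.length s holds iff NO cycle of back_map is reachable from s.
def okB (bm : List (Int × Int × Int × (List (Int × Int)))) : Nat → (Int × Int) → Bool
  | 0, s => (keyWays bm s).isNone
  | n + 1, s =>
    match keyWays bm s with
    | none => true
    | some ws => ws.all (okB bm n)

-- Pre_ excludes exactly the inputs on which a cycle of back_map is reachable from
-- final_state: there the Python A, a generator, never finishes yielding (its full
-- enumeration does not terminate), so A returns no value to match.
def Pre_reconstruct_all_paths (back_map : List (Int × Int × Int × (List (Int × Int)))) (final_state : Int × Int) : Prop :=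
  okB back_map back_map.length final_state = true

instance (back_map : List (Int × Int × Int × (List (Int × Int)))) (final_state : Int × Int) : Decidable (Pre_reconstruct_all_paths back_map final_state) := by unfold Pre_reconstruct_all_paths; infer_instance

def pvWitness_reconstruct_all_paths : (List (Int × Int × Int × (List (Int × Int)))) × (Int × Int) :=
  ([(0, 0, 5, [(1, 1)])], (0, 0))

def Spec_reconstruct_all_paths (back_map : List (Int × Int × Int × (List (Int × Int)))) (final_state : Int × Int) (out : List (List (Int × Int))) : Prop := out = reconstruct_all_paths_alt back_map final_state
instance (back_map : List (Int × Int × Int × (List (Int × Int)))) (final_state : Int × Int) (out : List (List (Int × Int))) : Decidable (Spec_reconstruct_all_paths back_map final_state out) := by unfold Spec_reconstruct_all_paths; infer_instance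

-- ===== CLAIM (what is proved, stated in full; the proofs are below) =====
def Claim_equal_reconstruct_all_paths : Prop := ∀ (back_map : List (Int × Int × Int × (List (Int × Int)))) (final_state : Int × Int), Dom_reconstruct_all_paths back_map final_state → Pre_reconstruct_all_paths back_map final_state → Spec_reconstruct_all_paths back_map final_state (reconstruct_all_paths back_map final_state)

-- ===== LEMMAS AND PROOFS =====

-- the value Python's path_back[-1] reads (paths are never empty where it is evaluated)
def lastE (p : List (Int × Int)) : Int × Int := PySem.List.pyGetD p (-1) (0, 0)

-- the precondition's library lookup agrees with the ports' association lookup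
theorem keyWays_eq (bm : List (Int × Int × Int × (List (Int × Int)))) (s : Int × Int) :
    keyWays bm s = (bmGet? bm s).map (fun x => x.2) := by
  induction bm with
  | nil => simp [keyWays, bmGet?]
  | cons y rest ih =>
    by_cases h : y.1 = s.1 ∧ y.2.1 = s.2
    · simp [keyWays, bmGet?, List.find?, h]
    · have hb : (y.1 == s.1 && y.2.1 == s.2) = false := by
        simp only [Bool.and_eq_false_iff, beq_eq_false_iff_ne]
        tauto
      simp only [keyWays, bmGet?, List.find?, hb, if_neg h]
      exact ih

theorem keyWays_none {bm : List (Int × Int × Int × (List (Int × Int)))} {s : Int × Int}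
    (h : bmGet? bm s = none) : keyWays bm s = none := by
  simp [keyWays_eq, h]

theorem keyWays_some {bm : List (Int × Int × Int × (List (Int × Int)))} {s : Int × Int}
    {x : Int × List (Int × Int)} (h : bmGet? bm s = some x) : keyWays bm s = some x.2 := by
  simp [keyWays_eq, h]

-- least n with okB bm n s, searched below a given bound (moA bm (N+1) s scans downward)
def moA (bm : List (Int × Int × Int × (List (Int × Int)))) : Nat → (Int × Int) → Nat
  | 0, _ => 0
  | n + 1, s => if okB bm n s then moA bm n s else n + 1

-- the rank of a state: depth at which its backward chains die out (see ok_mo / mo_le)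
def rnk (bm : List (Int × Int × Int × (List (Int × Int)))) (s : Int × Int) : Nat :=
  moA bm (bm.length + 1) s

-- weight of one stack entry and of a whole stack: each loop iteration of A strictly
-- decreases the total weight, so fuelF L (length bm) fuel never runs out under Pre_.
def wtM (bm : List (Int × Int × Int × (List (Int × Int)))) (L : Nat)
    (stack : List (List (Int × Int))) : Nat :=
  (stack.map (fun p => fuelF L (rnk bm (lastE p)))).sum

theorem fuelF_pos (L r : Nat) : 1 ≤ fuelF L r := by
  cases r <;> simp [fuelF]

theorem fuelF_mono (L : Nat) {r r' : Nat} (h : r ≤ r') : fuelF L r ≤ fuelF L r' := by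
  induction r' with
  | zero => simp [Nat.le_zero.mp h]
  | succ n ih =>
    rcases Nat.lt_or_ge r (n+1) with h' | h'
    · refine le_trans (ih (by omega)) ?_
      show fuelF L n ≤ 1 + L * fuelF L n
      rcases Nat.eq_zero_or_pos L with hL | hL
      · cases n <;> simp [fuelF, hL]
      · have := Nat.le_mul_of_pos_left (fuelF L n) hL; omega
    · have : r = n + 1 := by omega
      simp [this]

theorem ways_le_total {bm : List (Int × Int × Int × (List (Int × Int)))} {s : Int × Int}
    {x : Int × List (Int × Int)} (h : bmGet? bm s = some x) : x.2.length ≤ waysTotal bm := by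
  induction bm with
  | nil => simp [bmGet?] at h
  | cons y rest ih =>
    simp only [bmGet?] at h; simp only [waysTotal]
    split at h
    · cases h; simp
    · have := ih h; omega

theorem ok_none {bm : List (Int × Int × Int × (List (Int × Int)))} {s : Int × Int}
    (h : bmGet? bm s = none) : ∀ n, okB bm n s = true := by
  intro n; cases n <;> simp [okB, keyWays_none h]

theorem ok_succ {bm : List (Int × Int × Int × (List (Int × Int)))} :
    ∀ n s, okB bm n s = true → okB bm (n + 1) s = true := by
  intro n
  induction n with
  | zero =>
    intro s h
    simp only [okB, Option.isNone_iff_eq_none] at h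
    simp [okB, h]
  | succ m ih =>
    intro s h
    simp only [okB] at h ⊢
    cases hg : keyWays bm s with
    | none => rfl
    | some ws =>
      rw [hg] at h
      simp only [List.all_eq_true] at h ⊢
      exact fun w hw => ih w (h w hw)

theorem ok_le {bm : List (Int × Int × Int × (List (Int × Int)))} {n m : Nat} {s : Int × Int}
    (h : okB bm n s = true) (hle : n ≤ m) : okB bm m s = true := by
  induction m with
  | zero => have : n = 0 := by omega
            simpa [this] using h
  | succ k ih =>
    rcases Nat.lt_or_ge n (k + 1) with h' | h'
    · exact ok_succ k s (ih (by omega))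
    · have : n = k + 1 := by omega
      simpa [this] using h

theorem mo_le_self (bm : List (Int × Int × Int × (List (Int × Int)))) :
    ∀ n s, moA bm n s ≤ n := by
  intro n
  induction n with
  | zero => intro s; simp [moA]
  | succ k ih =>
    intro s
    simp only [moA]
    split
    · exact le_trans (ih s) (by omega)
    · omega

theorem ok_mo {bm : List (Int × Int × Int × (List (Int × Int)))} :
    ∀ n s, okB bm n s = true → okB bm (moA bm (n + 1) s) s = true := by
  intro n
  induction n with
  | zero => intro s h; simp [moA, h]
  | succ k ih =>
    intro s h
    simp only [moA, h, if_true]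
    by_cases hk : okB bm k s = true
    · have := ih s hk
      simpa [moA, hk] using this
    · have hkf : okB bm k s = false := by
        cases hkk : okB bm k s
        · rfl
        · exact absurd hkk hk
      simpa [moA, hkf] using h

theorem mo_le {bm : List (Int × Int × Int × (List (Int × Int)))} :
    ∀ n k s, okB bm k s = true → k ≤ n → moA bm (n + 1) s ≤ k := by
  intro n
  induction n with
  | zero =>
    intro k s h hle
    have : k = 0 := by omega
    subst this
    simp [moA, h]
  | succ m ih =>
    intro k s h hle
    have hok : okB bm (m + 1) s = true := ok_le h hle
    simp only [moA, hok, if_true]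
    rcases Nat.lt_or_ge k (m + 1) with h' | h'
    · have := ih k s h (by omega)
      simpa [moA] using this
    · have : k = m + 1 := by omega
      subst this
      have := mo_le_self bm (m + 1) s
      simpa [moA] using this

theorem rnk_le {bm : List (Int × Int × Int × (List (Int × Int)))} {s : Int × Int}
    (h : okB bm bm.length s = true) : rnk bm s ≤ bm.length :=
  mo_le bm.length bm.length s h (le_refl _)

theorem rnk_ok {bm : List (Int × Int × Int × (List (Int × Int)))} {s : Int × Int}
    (h : okB bm bm.length s = true) : okB bm (rnk bm s) s = true :=
  ok_mo bm.length s h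

theorem rank_zero_of_none {bm : List (Int × Int × Int × (List (Int × Int)))} {s : Int × Int}
    (h : bmGet? bm s = none) : rnk bm s = 0 := by
  unfold rnk
  generalize bm.length + 1 = n
  induction n with
  | zero => simp [moA]
  | succ k ih => simp [moA, ok_none h k, ih]

theorem rank_pos_of_some {bm : List (Int × Int × Int × (List (Int × Int)))} {s : Int × Int}
    {x : Int × List (Int × Int)} (hok : okB bm bm.length s = true)
    (h : bmGet? bm s = some x) : 1 ≤ rnk bm s := by
  by_contra hc
  have h0 : rnk bm s = 0 := by omega
  have := rnk_ok hok
  rw [h0] at this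
  simp [okB, keyWays_some h] at this

-- along every back-pointer the rank strictly decreases, and okB is preserved
theorem step_ok {bm : List (Int × Int × Int × (List (Int × Int)))} {s w : Int × Int}
    {x : Int × List (Int × Int)} (hok : okB bm bm.length s = true)
    (hg : bmGet? bm s = some x) (hw : w ∈ x.2) :
    okB bm bm.length w = true ∧ rnk bm w < rnk bm s := by
  have hr_ok : okB bm (rnk bm s) s = true := rnk_ok hok
  have hr_le : rnk bm s ≤ bm.length := rnk_le hok
  have hr_pos : 1 ≤ rnk bm s := rank_pos_of_some hok hg
  obtain ⟨m, hm⟩ : ∃ m, rnk bm s = m + 1 := ⟨rnk bm s - 1, by omega⟩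
  rw [hm] at hr_ok
  simp only [okB, keyWays_some hg, List.all_eq_true] at hr_ok
  have hwok : okB bm m w = true := hr_ok w hw
  constructor
  · exact ok_le hwok (by omega)
  · have : rnk bm w ≤ m := mo_le bm.length m w hwok (by omega)
    omega

theorem dfsB_succ (bm : List (Int × Int × Int × (List (Int × Int)))) (m : Nat)
    (path : List (Int × Int)) :
    dfsB bm (m + 1) path =
      match bmGet? bm (PySem.List.pyGetD path (-1) (0, 0)) with
      | none => [path.reverse]
      | some x => x.2.flatMap (fun way => dfsB bm m (path ++ [way])) := rfl

theorem lastE_concat (p : List (Int × Int)) (w : Int × Int) : lastE (p ++ [w]) = w := by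
  simp [lastE, PySem.List.pyGetD_neg_one_append_singleton]

-- B's dfs is insensitive to its fuel once the fuel exceeds the rank of the path's last state
theorem dfs_fuel_irrel {bm : List (Int × Int × Int × (List (Int × Int)))} :
    ∀ f1 f2 p, okB bm bm.length (lastE p) = true →
      rnk bm (lastE p) < f1 → rnk bm (lastE p) < f2 →
      dfsB bm f1 p = dfsB bm f2 p := by
  intro f1
  induction f1 with
  | zero => intro f2 p _ h1; omega
  | succ n ih =>
    intro f2 p hok h1 h2
    cases f2 with
    | zero => omega
    | succ m =>
      simp only [dfsB]
      cases hg : bmGet? bm (PySem.List.pyGetD p (-1) (0, 0)) with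
      | none => rfl
      | some x =>
        have hg' : bmGet? bm (lastE p) = some x := hg
        apply List.flatMap_congr
        intro w hw
        obtain ⟨hwok, hr⟩ := step_ok hok hg' hw
        have hlw : lastE (p ++ [w]) = w := lastE_concat p w
        apply ih <;> rw [hlw]
        · exact hwok
        · omega
        · omega

-- A's stack loop computes, in order, the concatenation of B's dfs over the stack (read
-- bottom-up = reversed), provided every stacked path is ok and the fuel dominates the
-- total weight of the stack.
theorem loopA_eq {bm : List (Int × Int × Int × (List (Int × Int)))} :
    ∀ fuel stack acc, (∀ p ∈ stack, okB bm bm.length (lastE p) = true) →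
      wtM bm (waysTotal bm) stack ≤ fuel →
      loopA bm fuel stack acc =
        acc ++ stack.reverse.flatMap (fun p => dfsB bm (rnk bm (lastE p) + 1) p) := by
  intro fuel
  induction fuel with
  | zero =>
    intro stack acc _ hM
    cases stack with
    | nil => simp [loopA]
    | cons p rest =>
      exfalso
      have := fuelF_pos (waysTotal bm) (rnk bm (lastE p))
      simp [wtM] at hM
      omega
  | succ n ih =>
    intro stack acc hstk hM
    rcases List.eq_nil_or_concat' stack with rfl | ⟨ys, p, rfl⟩
    · simp [loopA]
    · have hokp : okB bm bm.length (lastE p) = true := hstk p (by simp)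
      have hokys : ∀ q ∈ ys, okB bm bm.length (lastE q) = true :=
        fun q hq => hstk q (by simp [hq])
      have hlast : (ys ++ [p]).getLast? = some p := by simp
      have hdrop : (ys ++ [p]).dropLast = ys := by simp
      have hMsplit : wtM bm (waysTotal bm) (ys ++ [p]) =
          wtM bm (waysTotal bm) ys + fuelF (waysTotal bm) (rnk bm (lastE p)) := by
        simp [wtM]
      simp only [loopA, hlast, hdrop]
      cases hg : bmGet? bm (PySem.List.pyGetD p (-1) (0, 0)) with
      | none =>
        have hr0 : rnk bm (lastE p) = 0 := rank_zero_of_none hg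
        have hMys : wtM bm (waysTotal bm) ys ≤ n := by
          rw [hMsplit, hr0] at hM
          have h1 : fuelF (waysTotal bm) 0 = 1 := rfl
          omega
        rw [ih ys (acc ++ [p.reverse]) hokys hMys]
        have : dfsB bm (rnk bm (lastE p) + 1) p = [p.reverse] := by
          rw [hr0]; simp only [dfsB]; rw [hg]
        simp [this]
      | some x =>
        have hg' : bmGet? bm (lastE p) = some x := hg
        have hr1 : 1 ≤ rnk bm (lastE p) := rank_pos_of_some hokp hg'
        obtain ⟨r0, hr0⟩ : ∃ r0, rnk bm (lastE p) = r0 + 1 :=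
          ⟨rnk bm (lastE p) - 1, by omega⟩
        have hoknew : ∀ q ∈ ys ++ x.2.reverse.map (fun w => p ++ [w]),
            okB bm bm.length (lastE q) = true := by
          intro q hq
          rcases List.mem_append.mp hq with hq | hq
          · exact hokys q hq
          · simp only [List.mem_map, List.mem_reverse] at hq
            obtain ⟨w, hw, rfl⟩ := hq
            rw [lastE_concat]
            exact (step_ok hokp hg' hw).1
        -- weight of the pushed paths
        have hwsum : wtM bm (waysTotal bm) (x.2.reverse.map (fun w => p ++ [w])) ≤
            waysTotal bm * fuelF (waysTotal bm) r0 := by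
          have hb : ∀ q ∈ (x.2.reverse.map (fun w => p ++ [w])).map
              (fun q => fuelF (waysTotal bm) (rnk bm (lastE q))),
              q ≤ fuelF (waysTotal bm) r0 := by
            intro q hq
            simp only [List.map_map, List.mem_map, List.mem_reverse] at hq
            obtain ⟨w, hw, rfl⟩ := hq
            have hr := (step_ok hokp hg' hw).2
            simp only [Function.comp, lastE_concat]
            exact fuelF_mono _ (by omega)
          have := List.sum_le_card_nsmul _ _ hb
          simp only [smul_eq_mul, List.length_map, List.length_reverse] at this
          refine le_trans this ?_
          have := ways_le_total hg'
          exact Nat.mul_le_mul_right _ this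
        have hMnew : wtM bm (waysTotal bm) (ys ++ x.2.reverse.map (fun w => p ++ [w])) ≤ n := by
          have h1 : wtM bm (waysTotal bm) (ys ++ x.2.reverse.map (fun w => p ++ [w])) =
              wtM bm (waysTotal bm) ys + wtM bm (waysTotal bm) (x.2.reverse.map (fun w => p ++ [w])) := by
            simp [wtM]
          have hf : fuelF (waysTotal bm) (rnk bm (lastE p)) =
              1 + waysTotal bm * fuelF (waysTotal bm) r0 := by
            rw [hr0]; rfl
          rw [hMsplit, hf] at hM
          omega
        show loopA bm n (ys ++ x.2.reverse.map (fun way => p ++ [way])) acc = _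
        rw [ih _ acc hoknew hMnew]
        have hflat : (ys ++ x.2.reverse.map (fun w => p ++ [w])).reverse.flatMap
              (fun q => dfsB bm (rnk bm (lastE q) + 1) q) =
            (x.2.map (fun w => p ++ [w])).flatMap
              (fun q => dfsB bm (rnk bm (lastE q) + 1) q) ++
            ys.reverse.flatMap (fun q => dfsB bm (rnk bm (lastE q) + 1) q) := by
          simp [List.reverse_append, List.flatMap_append]
        rw [hflat]
        have hdfs : dfsB bm (rnk bm (lastE p) + 1) p =
            (x.2.map (fun w => p ++ [w])).flatMap
              (fun q => dfsB bm (rnk bm (lastE q) + 1) q) := by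
          rw [hr0, dfsB_succ]
          simp only [hg]
          rw [List.flatMap_map]
          apply List.flatMap_congr
          intro w hw
          obtain ⟨hwok, hr⟩ := step_ok hokp hg' hw
          rw [hr0] at hr
          apply dfs_fuel_irrel <;> rw [lastE_concat]
          · exact hwok
          · omega
          · omega
        have hrev : (ys ++ [p]).reverse = p :: ys.reverse := by simp
        simp only [hrev, List.flatMap_cons]
        rw [hdfs]

-- ===== VERDICT (by name: the statement is the Claim_ definition above) =====
theorem reconstruct_all_paths_spec : Claim_equal_reconstruct_all_paths := by
  intro bm fs _hdom hpre
  unfold Spec_reconstruct_all_paths reconstruct_all_paths reconstruct_all_paths_alt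
  have hlastE : lastE [fs] = fs := lastE_concat [] fs
  have hok : okB bm bm.length fs = true := hpre
  have hrle : rnk bm fs ≤ bm.length := rnk_le hok
  have hM : wtM bm (waysTotal bm) [[fs]] ≤ fuelF (waysTotal bm) bm.length := by
    simp [wtM, hlastE]
    exact fuelF_mono _ hrle
  have hstk : ∀ p ∈ [[fs]], okB bm bm.length (lastE p) = true := by
    intro p hp
    simp at hp
    subst hp
    rw [hlastE]; exact hok
  rw [loopA_eq _ [[fs]] [] hstk hM]
  simp only [List.reverse_cons, List.reverse_nil, List.nil_append, List.flatMap_cons,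
    List.flatMap_nil, List.append_nil]
  have h1 : okB bm bm.length (lastE [fs]) = true := by rw [hlastE]; exact hok
  exact (dfs_fuel_irrel _ _ [fs] h1 (by rw [hlastE]; omega) (by rw [hlastE]; omega)).symm
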